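-- pv_equiv track=rewrite | github.com/raymon-02/uwq-algo | 12_class/01_minimum_penalty_time.py | minimum_penalty_time_lin_one
-- ===== SOURCE A (Python) =====
-- def minimum_penalty_time_lin_one(tasks):
--     tasks.sort()
--     result = 0
--     wait_time = 0
--     for time in tasks:
--         result += wait_time
--         wait_time += time
--
--     return result
-- ===== SOURCE B (Python) =====
-- def minimum_penalty_time_lin_one(tasks):
--     tasks.sort()
--     counts = {}
--     for t in tasks:
--         counts[t] = counts.get(t, 0) + 1
--     result = 0
--     greater = 0  # number of tasks with a strictly larger value processed so far
--     for v in sorted(counts, reverse=True):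
--         c = counts[v]
--         # value v is the minimum of every pair it forms with a greater task,
--         # and of the C(c, 2) pairs among the equal tasks
--         result += v * (c * greater + c * (c - 1) // 2)
--         greater += c
--     return result
-- ===== Notes on version B (the rewrite author's own statement) =====
-- stated objective: alternative
-- what changed: Replaces A's running wait_time accumulation along the sorted list with a value-counting algorithm: build a dict of multiplicities, then sum, over distinct values in descending order, each value times (its count times the number of strictly greater tasks plus the number of equal-value pairs), using the identity that the total penalty is the sum of min(x,y) over all unordered task pairs.
import Mathlib
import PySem

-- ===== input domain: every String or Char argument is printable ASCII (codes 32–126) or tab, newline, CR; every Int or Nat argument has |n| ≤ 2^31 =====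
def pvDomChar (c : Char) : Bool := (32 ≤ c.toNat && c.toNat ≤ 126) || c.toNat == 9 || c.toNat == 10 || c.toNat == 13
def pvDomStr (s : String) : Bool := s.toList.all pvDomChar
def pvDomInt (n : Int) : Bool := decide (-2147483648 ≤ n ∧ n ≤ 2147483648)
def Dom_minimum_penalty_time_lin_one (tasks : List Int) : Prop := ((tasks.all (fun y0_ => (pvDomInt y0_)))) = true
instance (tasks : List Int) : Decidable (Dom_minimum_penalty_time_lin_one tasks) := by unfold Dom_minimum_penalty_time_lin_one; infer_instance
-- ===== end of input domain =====

-- B replaces A's running wait_time accumulation with a value-counting algorithm (a dict of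
-- multiplicities, summed over distinct values in descending order, each value weighted by the
-- number of pairs it is the minimum of). Both sort the argument in place (same mutation);
-- the equivalence proved here is about the return value.

-- ===== PORT A =====
-- for time in tasks: result += wait_time; wait_time += time   (state = (result, wait_time))
def minimum_penalty_time_lin_one (tasks : List Int) : Int :=
  ((PySem.List.sorted tasks (fun x => x)).foldl
    (fun (s : Int × Int) time => (s.1 + s.2, s.2 + time)) (0, 0)).1

-- ===== PORT B =====
-- counts[t] = counts.get(t, 0) + 1; then for v in sorted(counts, reverse=True):
--   result += v * (c * greater + c * (c - 1) // 2); greater += c   (state = (result, greater))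
def minimum_penalty_time_lin_one_alt (tasks : List Int) : Int :=
  let s := PySem.List.sorted tasks (fun x => x)
  let counts := s.foldl (fun (d : PySem.Dict Int Int) t => d.insert t (d.getD t 0 + 1)) PySem.Dict.empty
  let vs := PySem.List.sorted counts.keys (fun x => x) true
  (vs.foldl (fun (st : Int × Int) v =>
      let c := counts.getD v 0
      (st.1 + v * (c * st.2 + PySem.Int.floordiv (c * (c - 1)) 2), st.2 + c)) ((0 : Int), (0 : Int))).1

-- ===== PRECONDITION & SPEC =====
def Spec_minimum_penalty_time_lin_one (tasks : List Int) (out : Int) : Prop := out = minimum_penalty_time_lin_one_alt tasks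
instance (tasks : List Int) (out : Int) : Decidable (Spec_minimum_penalty_time_lin_one tasks out) := by unfold Spec_minimum_penalty_time_lin_one; infer_instance

-- ===== CLAIM =====
def Claim_equal_minimum_penalty_time_lin_one : Prop := ∀ (tasks : List Int), Dom_minimum_penalty_time_lin_one tasks → Spec_minimum_penalty_time_lin_one tasks (minimum_penalty_time_lin_one tasks)

-- ===== LEMMAS AND PROOFS =====

-- index-weighted sum of a list: each element times the number of elements after it
def pvW : List Int → Int
  | [] => 0
  | x :: t => x * (t.length : Int) + pvW t

-- c * (c - 1) // 2, the number of unordered pairs among c equal tasks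
def pvC2 (c : Int) : Int := PySem.Int.floordiv (c * (c - 1)) 2

-- total count, in s, of the values listed in ds
def pvSumC (s ds : List Int) : Int := (ds.map (fun w => ((s.count w : Nat) : Int))).sum

-- B's loop body, with the dict lookups replaced by counts in s
def pvF (s : List Int) (st : Int × Int) (v : Int) : Int × Int :=
  (st.1 + v * ((s.count v : Int) * st.2 + pvC2 (s.count v)), st.2 + (s.count v : Int))

-- B's result over the distinct values ds (processed in descending order, i.e. ds reversed),
-- with the 'greater' accumulator starting at b
def pvHb (s : List Int) (b : Int) : List Int → Int
  | [] => 0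
  | v :: t => v * ((s.count v : Int) * (b + pvSumC s t) + pvC2 (s.count v)) + pvHb s b t

-- A's loop from state (r, w) computes r + |l|·w + pvW l
theorem pvLoopA (l : List Int) : ∀ (r w : Int),
    (l.foldl (fun (s : Int × Int) time => (s.1 + s.2, s.2 + time)) (r, w)).1
      = r + (l.length : Int) * w + pvW l := by
  induction l with
  | nil => intro r w; simp [pvW]
  | cons t rest ih =>
      intro r w
      simp only [List.foldl_cons, pvW, List.length_cons]
      rw [ih]
      push_cast
      ring

theorem pvSndFold (s : List Int) (l : List Int) : ∀ (a b : Int),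
    ((l.foldl (pvF s) (a, b)).2 = b + pvSumC s l) := by
  induction l with
  | nil => intro a b; simp [pvSumC]
  | cons x t ih =>
      intro a b
      simp only [List.foldl_cons, pvF, pvSumC, List.map_cons, List.sum_cons]
      rw [ih]
      simp [pvSumC]; ring

theorem pvFoldRev (s : List Int) (ds : List Int) (a b : Int) :
    ((ds.reverse.foldl (pvF s) (a, b)).1 = a + pvHb s b ds) := by
  induction ds with
  | nil => simp [pvHb]
  | cons v t ih =>
      simp only [List.reverse_cons, List.foldl_append, List.foldl_cons, List.foldl_nil, pvHb]
      have h2 := pvSndFold s t.reverse a b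
      have h1 : (t.reverse.foldl (pvF s) (a, b)).1 = a + pvHb s b t := ih
      have hs : pvSumC s t.reverse = pvSumC s t := by
        simp [pvSumC, List.map_reverse]
      rw [pvF, h1, h2, hs]
      ring

-- distinct values of a sorted list are strictly increasing
theorem pvOfListLt (s : List Int) (h : s.Pairwise (· ≤ ·)) :
    (PySem.Set.ofList s).Pairwise (· < ·) := by
  induction s with
  | nil => simp [PySem.Set.ofList_nil]
  | cons x xs ih =>
      rw [PySem.Set.ofList_cons]
      rcases List.pairwise_cons.mp h with ⟨hle, hp⟩
      refine List.pairwise_cons.mpr ⟨?_, ?_⟩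
      · intro y hy
        rw [PySem.Set.mem_discard] at hy
        have hmem : y ∈ xs := (PySem.Set.mem_ofList _ _).mp hy.1
        exact lt_of_le_of_ne (hle y hmem) (Ne.symm hy.2)
      · have := ih hp
        simp only [PySem.Set.discard]
        exact List.Pairwise.sublist List.filter_sublist this

-- summing the multiplicities of all values of s gives |s|
theorem pvSumCounts (s : List Int) : ∀ (ds : List Int), ds.Nodup → (∀ x ∈ s, x ∈ ds) →
    pvSumC s ds = (s.length : Int) := by
  induction s with
  | nil => intro ds _ _; simp [pvSumC]
  | cons y s2 ih =>
      intro ds hnd hmem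
      have hstep : pvSumC (y :: s2) ds = pvSumC s2 ds + (ds.map (fun w => if w == y then (1 : Int) else 0)).sum := by
        unfold pvSumC
        rw [← PySem.List.sum_map_add_int]
        apply congrArg
        apply List.map_congr_left
        intro w _
        rcases eq_or_ne w y with rfl | hne
        · simp [List.count_cons_self]
        · simp [List.count_cons_of_ne hne.symm, hne]
      have hone : (ds.map (fun w => if w == y then (1 : Int) else 0)).sum = (ds.count y : Int) := by
        rw [PySem.List.sum_map_ite_one_zero (fun w => w == y)]
        simp [List.count]
      have hcy : ds.count y = 1 :=
        List.count_eq_one_of_mem hnd (hmem y (by simp))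
      rw [hstep, hone, hcy, ih ds hnd (fun x hx => hmem x (by simp [hx]))]
      simp only [List.length_cons]
      push_cast
      ring

-- pvHb only depends on the multiplicities of the listed values
theorem pvHbCongr (s1 s2 : List Int) (b : Int) : ∀ (ds : List Int),
    (∀ w ∈ ds, s1.count w = s2.count w) → pvHb s1 b ds = pvHb s2 b ds := by
  intro ds
  induction ds with
  | nil => intro _; simp [pvHb]
  | cons v t ih =>
      intro h
      have hv : s1.count v = s2.count v := h v (by simp)
      have ht : pvSumC s1 t = pvSumC s2 t := by
        unfold pvSumC
        apply congrArg
        apply List.map_congr_left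
        intro w hw
        rw [h w (by simp [hw])]
      simp only [pvHb, hv, ht, ih (fun w hw => h w (by simp [hw]))]

theorem pvC2_succ (c : Int) : pvC2 (c + 1) = pvC2 c + c := by
  unfold pvC2
  rw [PySem.Int.floordiv_eq_ediv_of_pos (by norm_num), PySem.Int.floordiv_eq_ediv_of_pos (by norm_num)]
  obtain ⟨k, hk⟩ := Int.even_mul_succ_self (c - 1)
  have h1 : c * (c - 1) = k + k := by linarith [hk]
  have h2 : (c + 1) * (c + 1 - 1) = (k + c) + (k + c) := by linarith [hk]
  omega

-- the key identity: on a sorted list, the index-weighted sum equals B's counting sum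
theorem pvKey (s : List Int) (h : s.Pairwise (· ≤ ·)) :
    pvW s = pvHb s 0 (PySem.Set.ofList s) := by
  induction s with
  | nil => simp [pvW, PySem.Set.ofList_nil, pvHb]
  | cons x s' ih =>
      rcases List.pairwise_cons.mp h with ⟨hle, hp⟩
      have ihx : pvW s' = pvHb s' 0 (PySem.Set.ofList s') := ih hp
      have hsuff : pvHb (x :: s') 0 (PySem.Set.ofList (x :: s'))
          = x * (s'.length : Int) + pvHb s' 0 (PySem.Set.ofList s') := by
        by_cases hx : x ∈ s'
        · -- x occurs again: the distinct values are unchanged, x heads them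
          obtain ⟨h0, t, hds⟩ : ∃ h0 t, PySem.Set.ofList s' = h0 :: t := by
            have : x ∈ PySem.Set.ofList s' := (PySem.Set.mem_ofList _ _).mpr hx
            cases hd : PySem.Set.ofList s' with
            | nil => rw [hd] at this; simp at this
            | cons h0 t => exact ⟨h0, t, rfl⟩
          have hlt : (PySem.Set.ofList s').Pairwise (· < ·) := pvOfListLt s' hp
          rw [hds] at hlt
          rcases List.pairwise_cons.mp hlt with ⟨hgt, _⟩
          have hxm : x ∈ PySem.Set.ofList s' := (PySem.Set.mem_ofList _ _).mpr hx
          have hh0 : h0 = x := by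
            rw [hds] at hxm
            rcases List.mem_cons.mp hxm with h | h
            · exact h.symm
            · have := hgt x h
              have hx0 : x ≤ h0 := by
                have : h0 ∈ s' := (PySem.Set.mem_ofList _ _).mp (by rw [hds]; simp)
                exact hle h0 this
              omega
          rw [hh0] at hds hgt
          have hxt : x ∉ t := fun hmem => absurd (hgt x hmem) (lt_irrefl x)
          have htne : ∀ y ∈ t, y ≠ x := fun y hy => ne_of_gt (hgt y hy)
          have hofl : PySem.Set.ofList (x :: s') = x :: t := by
            rw [PySem.Set.ofList_cons, hds]
            simp only [PySem.Set.discard]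
            rw [List.filter_cons]
            simp only [beq_self_eq_true, Bool.not_true, Bool.false_eq_true, if_false]
            congr 1
            apply List.filter_eq_self.mpr
            intro y hy
            simp [htne y hy]
          rw [hofl, hds]
          have hcnt : ∀ w ∈ t, (x :: s').count w = s'.count w := by
            intro w hw
            exact List.count_cons_of_ne (htne w hw).symm
          have hsumc : pvSumC (x :: s') t = pvSumC s' t := by
            unfold pvSumC
            apply congrArg
            apply List.map_congr_left
            intro w hw
            rw [hcnt w hw]
          have htail : pvHb (x :: s') 0 t = pvHb s' 0 t := pvHbCongr _ _ _ t hcnt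
          have hcx : (x :: s').count x = s'.count x + 1 := List.count_cons_self
          have htot : (s'.count x : Int) + pvSumC s' t = (s'.length : Int) := by
            have := pvSumCounts s' (PySem.Set.ofList s') (PySem.Set.nodup_ofList s')
              (fun y hy => (PySem.Set.mem_ofList _ _).mpr hy)
            rw [hds] at this
            unfold pvSumC at this ⊢
            simpa using this
          simp only [pvHb, hcx, htail, hsumc]
          push_cast
          rw [pvC2_succ]
          have : pvSumC s' t = (s'.length : Int) - (s'.count x : Int) := by omega
          rw [this]
          ring
        · -- x is a fresh (strictly smallest) value
          have hofl : PySem.Set.ofList (x :: s') = x :: PySem.Set.ofList s' := by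
            rw [PySem.Set.ofList_cons]
            congr 1
            simp only [PySem.Set.discard]
            apply List.filter_eq_self.mpr
            intro y hy
            have : y ∈ s' := (PySem.Set.mem_ofList _ _).mp hy
            have : y ≠ x := fun he => hx (he ▸ this)
            simp [this]
          rw [hofl]
          have hne : ∀ w ∈ PySem.Set.ofList s', w ≠ x := by
            intro w hw he
            exact hx (he ▸ (PySem.Set.mem_ofList _ _).mp hw)
          have hcnt : ∀ w ∈ PySem.Set.ofList s', (x :: s').count w = s'.count w := by
            intro w hw
            exact List.count_cons_of_ne (hne w hw).symm
          have hsumc : pvSumC (x :: s') (PySem.Set.ofList s') = pvSumC s' (PySem.Set.ofList s') := by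
            unfold pvSumC
            apply congrArg
            apply List.map_congr_left
            intro w hw
            rw [hcnt w hw]
          have htail : pvHb (x :: s') 0 (PySem.Set.ofList s') = pvHb s' 0 (PySem.Set.ofList s') :=
            pvHbCongr _ _ _ _ hcnt
          have hcx : (x :: s').count x = 1 := by
            rw [List.count_cons_self, List.count_eq_zero_of_not_mem hx]
          have htot : pvSumC s' (PySem.Set.ofList s') = (s'.length : Int) :=
            pvSumCounts s' (PySem.Set.ofList s') (PySem.Set.nodup_ofList s')
              (fun y hy => (PySem.Set.mem_ofList _ _).mpr hy)
          simp only [pvHb, hcx, htail, hsumc, htot]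
          have hc21 : pvC2 ((1 : Nat) : Int) = 0 := by decide
          rw [hc21]
          ring
      simp only [pvW, hsuff, ihx]

-- ===== VERDICT =====
theorem minimum_penalty_time_lin_one_spec : Claim_equal_minimum_penalty_time_lin_one := by
  intro tasks _
  unfold Spec_minimum_penalty_time_lin_one minimum_penalty_time_lin_one minimum_penalty_time_lin_one_alt
  set s := PySem.List.sorted tasks (fun x => x) with hs
  have hsorted : s.Pairwise (· ≤ ·) := PySem.List.sorted_pairwise tasks (fun x => x)
  -- A's side
  rw [pvLoopA]
  -- B's side: the dict is Counter(s), its keys are the distinct values of s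
  simp only [PySem.Dict.foldl_insert_getD_add_one_eq_counter, PySem.Dict.keys_counter,
    PySem.Dict.getD_counter]
  have hvs : PySem.List.sorted (PySem.Set.ofList s) (fun x => x) true = (PySem.Set.ofList s).reverse := by
    apply PySem.List.sorted_rev_eq_of_perm_of_pairwise_gt
    · exact List.reverse_perm _
    · exact (List.pairwise_reverse).mpr (pvOfListLt s hsorted)
  rw [hvs]
  have hfun : (fun (st : Int × Int) v =>
      (st.1 + v * ((s.count v : Int) * st.2 + PySem.Int.floordiv ((s.count v : Int) * ((s.count v : Int) - 1)) 2),
       st.2 + (s.count v : Int))) = pvF s := by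
    funext st v
    simp [pvF, pvC2]
  rw [hfun, pvFoldRev]
  rw [pvKey s hsorted]
  simp
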